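-- pv_equiv track=rewrite | github.com/ahmedkobtan/jrah-vibeathon-project | backend/agents/adaptive_parser.py | _heuristic_schema_matching
-- ===== SOURCE A (Python) =====
-- from typing import List, Dict, Any, Optional
--
-- def _heuristic_schema_matching(sample_data: List[Dict]) -> Dict[str, Optional[str]]:
--     """
--     Fallback heuristic matching when LLM is not available
--     Looks for common field name patterns
--     """
--     if not sample_data:
--         return {}
--
--     fields = list(sample_data[0].keys())
--     mapping = {}
--
--     # Common patterns for each standard field
--     patterns = {
--         'provider_name': ['hospital', 'facility', 'provider', 'name'],
--         'provider_npi': ['npi', 'provider_id', 'national_provider'],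
--         'cpt_code': ['cpt', 'code', 'procedure_code', 'hcpcs'],
--         'procedure_description': ['description', 'procedure', 'service'],
--         'payer_name': ['payer', 'insurance', 'carrier', 'plan'],
--         'negotiated_rate': ['negotiated', 'rate', 'amount', 'price'],
--         'standard_charge': ['standard', 'gross', 'charge', 'list_price']
--     }
--
--     for std_field, search_patterns in patterns.items():
--         mapping[std_field] = None
--         for field in fields:
--             field_lower = field.lower().replace('_', '').replace(' ', '')
--             for pattern in search_patterns:
--                 if pattern in field_lower:
--                     mapping[std_field] = field
--                     break
--             if mapping[std_field]:
--                 break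
--
--     return mapping
-- ===== SOURCE B (Python) =====
-- from typing import List, Dict, Optional
--
-- def _heuristic_schema_matching(sample_data: List[Dict]) -> Dict[str, Optional[str]]:
--     """Single pass over the fields: normalize each field name once, then fill
--     every still-empty standard-field slot it matches."""
--     patterns = {
--         'provider_name': ['hospital', 'facility', 'provider', 'name'],
--         'provider_npi': ['npi', 'provider_id', 'national_provider'],
--         'cpt_code': ['cpt', 'code', 'procedure_code', 'hcpcs'],
--         'procedure_description': ['description', 'procedure', 'service'],
--         'payer_name': ['payer', 'insurance', 'carrier', 'plan'],
--         'negotiated_rate': ['negotiated', 'rate', 'amount', 'price'],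
--         'standard_charge': ['standard', 'gross', 'charge', 'list_price']
--     }
--     if not sample_data:
--         return {}
--     table = [(std, pats, None) for std, pats in patterns.items()]
--     for field in sample_data[0].keys():
--         field_lower = field.lower().replace('_', '').replace(' ', '')
--         table = [(std, pats,
--                   found if found is not None
--                   else (field if any(p in field_lower for p in pats) else None))
--                  for std, pats, found in table]
--     return {std: found for std, pats, found in table}
-- ===== Notes on version B (the rewrite author's own statement) =====
-- stated objective: alternative
-- what changed: Inverts the loop nesting: one pass over the fields (each field name normalized exactly once) that fills every still-empty standard-field slot it matches, instead of seven separate rescans of the field list with per-pattern breaks; 'first field wins' is preserved because a filled slot is never overwritten.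
import Mathlib
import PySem

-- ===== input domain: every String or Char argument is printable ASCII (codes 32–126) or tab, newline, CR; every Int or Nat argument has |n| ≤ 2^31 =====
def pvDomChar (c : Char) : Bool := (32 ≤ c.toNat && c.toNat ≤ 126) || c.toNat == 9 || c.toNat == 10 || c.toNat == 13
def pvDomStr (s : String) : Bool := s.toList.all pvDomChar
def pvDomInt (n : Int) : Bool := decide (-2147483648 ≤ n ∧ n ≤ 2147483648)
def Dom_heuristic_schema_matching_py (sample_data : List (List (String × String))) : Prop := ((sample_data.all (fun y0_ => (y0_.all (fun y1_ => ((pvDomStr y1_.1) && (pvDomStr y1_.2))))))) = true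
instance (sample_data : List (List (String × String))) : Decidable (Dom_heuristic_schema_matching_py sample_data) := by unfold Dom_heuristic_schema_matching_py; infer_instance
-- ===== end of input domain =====

-- B inverts the loop nesting: one pass over the fields (each field normalized once)
-- filling every still-empty standard-field slot, instead of seven rescans of the fields.

-- ===== PORT A =====
-- the literal `patterns` dict (shared literal data of both Pythons)
def pvPatterns : List (String × List String) :=
  [("provider_name", ["hospital", "facility", "provider", "name"]),
   ("provider_npi", ["npi", "provider_id", "national_provider"]),
   ("cpt_code", ["cpt", "code", "procedure_code", "hcpcs"]),
   ("procedure_description", ["description", "procedure", "service"]),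
   ("payer_name", ["payer", "insurance", "carrier", "plan"]),
   ("negotiated_rate", ["negotiated", "rate", "amount", "price"]),
   ("standard_charge", ["standard", "gross", "charge", "list_price"])]

-- field.lower().replace('_', '').replace(' ', '')
def pvNorm (f : String) : String :=
  PySem.Str.replace (PySem.Str.replace (PySem.Str.lower f) "_" "") " " ""

-- Python truthiness of the current mapping[std] (None or a str)
def pvTruthy : Option String → Bool
  | none => false
  | some s => !(s == "")

-- 'for pattern in search_patterns: if pattern in field_lower: mapping[std]=field; break'
def pvAPat (fl f : String) (cur : Option String) : List String → Option String
  | [] => cur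
  | p :: rest => if PySem.Str.isIn p fl then some f else pvAPat fl f cur rest

-- 'for field in fields: … ; if mapping[std]: break', threading mapping[std] as cur
def pvAFields (pats : List String) (cur : Option String) : List String → Option String
  | [] => cur
  | f :: rest =>
      let fl := pvNorm f
      let cur' := pvAPat fl f cur pats
      if pvTruthy cur' then cur' else pvAFields pats cur' rest

def heuristic_schema_matching_py (sample_data : List (List (String × String))) : List (String × Option String) :=
  match sample_data with
  | [] => []
  | first :: _ =>
      let fields := (PySem.Dict.ofList first).keys
      -- 'for std_field, search_patterns in patterns.items(): mapping[std_field] = None; <field loop>'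
      let mapping : PySem.Dict String (Option String) :=
        pvPatterns.foldl
          (fun d sp => (d.insert sp.1 none).insert sp.1 (pvAFields sp.2 none fields))
          PySem.Dict.empty
      mapping.items

-- ===== PORT B =====
-- any(p in field_lower for p in pats)
def pvBMatch (fl : String) (pats : List String) : Bool :=
  pats.any (fun p => PySem.Str.isIn p fl)

-- the per-field comprehension rebuilding the table
def pvBStep (f : String) (table : List (String × List String × Option String)) :
    List (String × List String × Option String) :=
  let fl := pvNorm f
  table.map (fun e =>
    (e.1, e.2.1,
      match e.2.2 with
      | some v => some v
      | none => if pvBMatch fl e.2.1 then some f else none))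

def heuristic_schema_matching_py_alt (sample_data : List (List (String × String))) : List (String × Option String) :=
  match sample_data with
  | [] => []
  | first :: _ =>
      let table0 := pvPatterns.map (fun sp => (sp.1, sp.2, (none : Option String)))
      let table := ((PySem.Dict.ofList first).keys).foldl (fun t f => pvBStep f t) table0
      table.map (fun e => (e.1, e.2.2))

-- ===== PRECONDITION & SPEC =====
def Spec_heuristic_schema_matching_py (sample_data : List (List (String × String))) (out : List (String × Option String)) : Prop := out = heuristic_schema_matching_py_alt sample_data
instance (sample_data : List (List (String × String))) (out : List (String × Option String)) : Decidable (Spec_heuristic_schema_matching_py sample_data out) := by unfold Spec_heuristic_schema_matching_py; infer_instance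

-- ===== CLAIM (what is proved, stated in full; the proofs are below) =====
def Claim_equal_heuristic_schema_matching_py : Prop := ∀ (sample_data : List (List (String × String))), Dom_heuristic_schema_matching_py sample_data → Spec_heuristic_schema_matching_py sample_data (heuristic_schema_matching_py sample_data)

-- ===== LEMMAS AND PROOFS =====

-- B's per-slot update, extracted
def pvSlotUpd (pats : List String) (cur : Option String) (f : String) : Option String :=
  match cur with
  | some v => some v
  | none => if pvBMatch (pvNorm f) pats then some f else none

-- B's per-table-entry update (pvBStep is its map)
def pvBElem (f : String) (e : String × List String × Option String) :
    String × List String × Option String :=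
  (e.1, e.2.1,
    match e.2.2 with
    | some v => some v
    | none => if pvBMatch (pvNorm f) e.2.1 then some f else none)

theorem pvAPat_eq (fl f : String) (cur : Option String) (pats : List String) :
    pvAPat fl f cur pats = if pvBMatch fl pats then some f else cur := by
  induction pats with
  | nil => simp [pvAPat, pvBMatch]
  | cons p rest ih =>
      by_cases h : PySem.Chars.isIn p.toList fl.toList = true
      · simp [pvAPat, pvBMatch, h]
      · simp [pvAPat, pvBMatch, h, ih]

theorem pvMatch_ne_empty (pats : List String) (hp : pats.all (· ≠ "") = true)
    (f : String) (hm : pvBMatch (pvNorm f) pats = true) : f ≠ "" := by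
  rintro rfl
  have hnorm : pvNorm "" = "" := by decide
  rw [hnorm] at hm
  simp only [pvBMatch, List.any_eq_true] at hm
  obtain ⟨p, hpmem, hpin⟩ := hm
  have hpne : p ≠ "" := by
    simp only [List.all_eq_true, decide_eq_true_eq] at hp
    exact hp p hpmem
  have h1 := (PySem.Str.isIn_iff_infix (sub := p) (s := "")).mp hpin
  simp only [String.toList_empty, List.infix_nil] at h1
  exact hpne (by simpa using h1)

theorem pvSlotFold_some (pats : List String) (v : String) (fs : List String) :
    fs.foldl (pvSlotUpd pats) (some v) = some v := by
  induction fs with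
  | nil => rfl
  | cons f rest ih => simpa [pvSlotUpd] using ih

theorem pvSlot_eq (pats : List String) (hp : pats.all (· ≠ "") = true)
    (fs : List String) :
    pvAFields pats none fs = fs.foldl (pvSlotUpd pats) none := by
  induction fs with
  | nil => rfl
  | cons f rest ih =>
      simp only [pvAFields, pvAPat_eq, List.foldl_cons]
      by_cases hm : pvBMatch (pvNorm f) pats
      · have hf : f ≠ "" := pvMatch_ne_empty pats hp f hm
        simp [hm, pvTruthy, hf, pvSlotUpd, pvSlotFold_some]
      · simp [hm, pvTruthy, pvSlotUpd, ih]

-- fold of a map-rebuilding step = map of the per-element fold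
theorem pvFold_map_comm {α β : Type} (g : β → α → α) (fs : List β) (t : List α) :
    fs.foldl (fun t f => t.map (g f)) t = t.map (fun e => fs.foldl (fun e f => g f e) e) := by
  induction fs generalizing t with
  | nil => simp
  | cons f rest ih => simp [ih, List.map_map, Function.comp_def]

-- pvBElem keeps the first two components and acts as pvSlotUpd on the third
theorem pvTriple_fold (s : String) (pats : List String) (fs : List String) :
    ∀ o, fs.foldl (fun e f => pvBElem f e) (s, pats, o) = (s, pats, fs.foldl (pvSlotUpd pats) o) := by
  induction fs with
  | nil => intro o; rfl
  | cons f rest ih =>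
      intro o
      simp only [List.foldl_cons]
      have h1 : pvBElem f (s, pats, o) = (s, pats, pvSlotUpd pats o f) := rfl
      rw [h1, ih]

-- A's dict-building fold over the distinct literal std keys appends the 7 items in order
theorem pvA_items (fields : List String) :
    (pvPatterns.foldl
        (fun (d : PySem.Dict String (Option String)) sp =>
          (d.insert sp.1 none).insert sp.1 (pvAFields sp.2 none fields))
        PySem.Dict.empty).items
      = pvPatterns.map (fun sp => (sp.1, pvAFields sp.2 none fields)) := by
  have hcollapse :
      (fun (d : PySem.Dict String (Option String)) (sp : String × List String) =>
          (d.insert sp.1 none).insert sp.1 (pvAFields sp.2 none fields))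
        = fun d sp => d.insert sp.1 (pvAFields sp.2 none fields) := by
    funext d sp
    exact PySem.Dict.insert_insert_self d sp.1 none (pvAFields sp.2 none fields)
  rw [hcollapse]
  exact PySem.Dict.items_foldl_insert_fresh pvPatterns (fun sp => sp.1)
    (fun sp => pvAFields sp.2 none fields) PySem.Dict.empty
    (fun a _ => PySem.Dict.contains_empty a.1) (by decide)

-- ===== VERDICT (by name: the statement is the Claim_ definition above) =====
theorem heuristic_schema_matching_py_spec : Claim_equal_heuristic_schema_matching_py := by
  intro sample_data _
  unfold Spec_heuristic_schema_matching_py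
  match sample_data with
  | [] => rfl
  | first :: rest =>
      simp only [heuristic_schema_matching_py, heuristic_schema_matching_py_alt]
      rw [pvA_items]
      rw [show (fun (t : List (String × List String × Option String)) (f : String) => pvBStep f t)
            = (fun t f => t.map (pvBElem f)) from rfl]
      rw [pvFold_map_comm pvBElem, List.map_map, List.map_map]
      apply List.map_congr_left
      intro sp hsp
      have hp : sp.2.all (· ≠ "") = true := by fin_cases hsp <;> decide
      simp only [Function.comp_apply]
      rw [pvTriple_fold, pvSlot_eq sp.2 hp]
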